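-- pv_equiv track=rewrite | github.com/albazzaztariq/UniLogic | Testing/VerifyTest/sqlite_01_intmath/20260321_210553_compiler.py | _convert_printf
-- ===== SOURCE A (Python) =====
-- def _convert_printf(args):
--     """Convert printf format string + args to UL print expression.
--     Returns a string like: "prefix" + cast(x, string) + " suffix"
--     """
--     if not args:
--         return '""'
--
--     fmt = args[0]
--     # Strip quotes
--     if fmt.startswith('"') and fmt.endswith('"'):
--         fmt = fmt[1:-1]
--     else:
--         # Not a literal format string — can't convert
--         return f'"" // printf with dynamic format - not converted'
--
--     rest = args[1:]
--     arg_idx = 0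
--     parts = []
--     current = ""
--     i = 0
--     while i < len(fmt):
--         if fmt[i] == '%' and i + 1 < len(fmt):
--             i += 1
--             # Skip flags, width, precision
--             while i < len(fmt) and fmt[i] in '0123456789.-+ #l':
--                 i += 1
--             if i < len(fmt):
--                 spec = fmt[i]
--                 if spec == '%':
--                     current += '%'
--                 elif spec in ('d', 'i', 'u', 'x', 'X', 'o'):
--                     if current:
--                         parts.append(f'"{current}"')
--                         current = ""
--                     if arg_idx < len(rest):
--                         parts.append(f"cast({rest[arg_idx]}, string)")
--                         arg_idx += 1
--                 elif spec in ('f', 'e', 'E', 'g', 'G'):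
--                     if current:
--                         parts.append(f'"{current}"')
--                         current = ""
--                     if arg_idx < len(rest):
--                         parts.append(f"cast({rest[arg_idx]}, string)")
--                         arg_idx += 1
--                 elif spec == 's':
--                     if current:
--                         parts.append(f'"{current}"')
--                         current = ""
--                     if arg_idx < len(rest):
--                         parts.append(rest[arg_idx])
--                         arg_idx += 1
--                 elif spec == 'c':
--                     if current:
--                         parts.append(f'"{current}"')
--                         current = ""
--                     if arg_idx < len(rest):
--                         parts.append(f"cast({rest[arg_idx]}, string)")
--                         arg_idx += 1
--                 else:
--                     current += f"%{spec}"
--             i += 1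
--         elif fmt[i] == '\\' and i + 1 < len(fmt):
--             esc = fmt[i + 1]
--             if esc == 'n':
--                 current += '\\n'
--             elif esc == 't':
--                 current += '\\t'
--             elif esc == '\\':
--                 current += '\\\\'
--             elif esc == '"':
--                 current += '\\"'
--             else:
--                 current += fmt[i:i+2]
--             i += 2
--         else:
--             current += fmt[i]
--             i += 1
--
--     if current:
--         parts.append(f'"{current}"')
--
--     if not parts:
--         return '""'
--
--     return " + ".join(parts)
-- ===== SOURCE B (Python) =====
-- _ESC = {'n': '\\n', 't': '\\t', '\\': '\\\\', '"': '\\"'}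
--
--
-- def _scan(fmt):
--     """Phase 1: turn the format body into a flat event list.
--     ('lit', text): literal contribution; ('hole', is_cast): argument slot."""
--     events = []
--     i = 0
--     n = len(fmt)
--     while i < n:
--         c = fmt[i]
--         if c == '%' and i + 1 < n:
--             j = i + 1
--             while j < n and fmt[j] in '0123456789.-+ #l':
--                 j += 1
--             if j < n:
--                 spec = fmt[j]
--                 if spec == '%':
--                     events.append(('lit', '%'))
--                 elif spec in 'diuxXofeEgGcs':
--                     events.append(('hole', spec != 's'))
--                 else:
--                     events.append(('lit', '%' + spec))
--             i = j + 1
--         elif c == '\\' and i + 1 < n: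
--             events.append(('lit', _ESC.get(fmt[i + 1], fmt[i:i + 2])))
--             i += 2
--         else:
--             events.append(('lit', c))
--             i += 1
--     return events
--
--
-- def _convert_printf(args):
--     """Convert printf format string + args to UL print expression."""
--     if not args:
--         return '""'
--
--     fmt = args[0]
--     if not (fmt.startswith('"') and fmt.endswith('"')):
--         return '"" // printf with dynamic format - not converted'
--
--     rest = args[1:]
--     # Phase 2: render the event list, grouping literal runs between holes.
--     parts = []
--     buf = []
--     arg_idx = 0
--     for kind, val in _scan(fmt[1:-1]):
--         if kind == 'lit':
--             buf.append(val)
--         else: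
--             text = ''.join(buf)
--             if text:
--                 parts.append(f'"{text}"')
--                 buf = []
--             if arg_idx < len(rest):
--                 a = rest[arg_idx]
--                 arg_idx += 1
--                 parts.append(f"cast({a}, string)" if val else a)
--     text = ''.join(buf)
--     if text:
--         parts.append(f'"{text}"')
--     return " + ".join(parts) if parts else '""'
-- ===== Notes on version B (the rewrite author's own statement) =====
-- stated objective: alternative
-- what changed: A's single while/index state machine interleaving scanning with output state (parts/current/arg_idx) is split into two independent phases: a scanner that compiles the format body into a flat event list (literal pieces and argument holes, specs classified by membership and escapes by a lookup table), and a separate renderer fold that groups literal runs and assigns arguments.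
import Mathlib
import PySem

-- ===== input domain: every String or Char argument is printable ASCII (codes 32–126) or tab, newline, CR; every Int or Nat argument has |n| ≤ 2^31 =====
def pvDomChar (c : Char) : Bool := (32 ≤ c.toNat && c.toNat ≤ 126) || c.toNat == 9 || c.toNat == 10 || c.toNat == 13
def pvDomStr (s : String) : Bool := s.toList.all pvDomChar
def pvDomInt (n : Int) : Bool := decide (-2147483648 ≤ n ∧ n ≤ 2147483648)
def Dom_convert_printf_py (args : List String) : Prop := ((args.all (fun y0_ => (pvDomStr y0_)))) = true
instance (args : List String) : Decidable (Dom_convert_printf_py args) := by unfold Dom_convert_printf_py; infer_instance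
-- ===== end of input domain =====

-- B splits A's single scanning/output state machine into two independent phases — a scanner
-- compiling the format into an event list, then a renderer fold (objective: alternative, same cost).

-- ===== PORT A =====
-- the flag/width/precision characters '0123456789.-+ #l'
def pvFlags : List Char := ['0','1','2','3','4','5','6','7','8','9','.','-','+',' ','#','l']

-- f'"{current}"'
def pvQuote (current : List Char) : List Char := '"' :: current ++ ['"']

-- the while-loop of A: state (i as remaining chars, parts, current, arg_idx)
def convertLoopA (rest : List String) (cs : List Char) (argIdx : Nat)
    (parts : List (List Char)) (current : List Char) : List (List Char) × List Char :=
  match cs with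
  | [] => (parts, current)
  | c :: cs' =>
    if c = '%' ∧ cs' ≠ [] then
      -- i += 1; while … in '0123456789.-+ #l': i += 1
      match h : cs'.dropWhile (fun x => pvFlags.contains x) with
      | [] => (parts, current)          -- i reached len(fmt): loop ends after i += 1
      | spec :: cs'' =>
        if spec = '%' then
          convertLoopA rest cs'' argIdx parts (current ++ ['%'])
        else if spec = 'd' ∨ spec = 'i' ∨ spec = 'u' ∨ spec = 'x' ∨ spec = 'X' ∨ spec = 'o' then
          let st := if current ≠ [] then (parts ++ [pvQuote current], ([] : List Char)) else (parts, current)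
          if argIdx < rest.length then
            convertLoopA rest cs'' (argIdx + 1)
              (st.1 ++ [("cast(" ++ rest.getD argIdx "" ++ ", string)").toList]) st.2
          else convertLoopA rest cs'' argIdx st.1 st.2
        else if spec = 'f' ∨ spec = 'e' ∨ spec = 'E' ∨ spec = 'g' ∨ spec = 'G' then
          let st := if current ≠ [] then (parts ++ [pvQuote current], ([] : List Char)) else (parts, current)
          if argIdx < rest.length then
            convertLoopA rest cs'' (argIdx + 1)
              (st.1 ++ [("cast(" ++ rest.getD argIdx "" ++ ", string)").toList]) st.2
          else convertLoopA rest cs'' argIdx st.1 st.2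
        else if spec = 's' then
          let st := if current ≠ [] then (parts ++ [pvQuote current], ([] : List Char)) else (parts, current)
          if argIdx < rest.length then
            convertLoopA rest cs'' (argIdx + 1) (st.1 ++ [(rest.getD argIdx "").toList]) st.2
          else convertLoopA rest cs'' argIdx st.1 st.2
        else if spec = 'c' then
          let st := if current ≠ [] then (parts ++ [pvQuote current], ([] : List Char)) else (parts, current)
          if argIdx < rest.length then
            convertLoopA rest cs'' (argIdx + 1)
              (st.1 ++ [("cast(" ++ rest.getD argIdx "" ++ ", string)").toList]) st.2
          else convertLoopA rest cs'' argIdx st.1 st.2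
        else
          convertLoopA rest cs'' argIdx parts (current ++ ['%', spec])
    else if c = '\\' ∧ cs' ≠ [] then
      match cs' with
      | [] => (parts, current)          -- unreachable: cs' ≠ []
      | e :: cs'' =>
        let add : List Char :=
          if e = 'n' then ['\\', 'n']
          else if e = 't' then ['\\', 't']
          else if e = '\\' then ['\\', '\\']
          else if e = '"' then ['\\', '"']
          else [c, e]                    -- fmt[i:i+2]
        convertLoopA rest cs'' argIdx parts (current ++ add)
    else
      convertLoopA rest cs' argIdx parts (current ++ [c])
  termination_by cs.length
  decreasing_by
    all_goals first
      | (simp only [List.length_cons]; omega)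
      | (have h1 := List.length_dropWhile_le (p := fun x => pvFlags.contains x) (l := cs')
         simp_all; omega)

def convert_printf_py (args : List String) : String :=
  match args with
  | [] => "\"\""
  | fmt0 :: rest =>
    if PySem.Chars.startswith fmt0.toList ['"'] ∧ PySem.Chars.endswith fmt0.toList ['"'] then
      let fmt := PySem.List.slice fmt0.toList (some 1) (some (-1))   -- fmt[1:-1]
      let st := convertLoopA rest fmt 0 [] []
      let parts := if st.2 ≠ [] then st.1 ++ [pvQuote st.2] else st.1
      if parts = [] then "\"\""
      else String.ofList (PySem.Chars.join (" + ".toList) parts)         -- " + ".join(parts)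
    else "\"\" // printf with dynamic format - not converted"

-- ===== PORT B =====
-- Phase 1 events: literal contribution ('lit', text) / argument slot ('hole', is_cast)
inductive PEvt where
  | lit : List Char → PEvt
  | hole : Bool → PEvt
deriving DecidableEq, Repr

-- the _ESC lookup table
def pvEsc : PySem.Dict Char (List Char) :=
  PySem.Dict.mk [('n', ['\\','n']), ('t', ['\\','t']), ('\\', ['\\','\\']), ('"', ['\\','"'])]

-- _scan: compile the format body into a flat event list (no output state at all)
def scanB (cs : List Char) : List PEvt :=
  match cs with
  | [] => []
  | c :: cs' =>
    if c = '%' ∧ cs' ≠ [] then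
      match h : cs'.dropWhile (fun x => pvFlags.contains x) with
      | [] => []                                        -- j reached n: no event
      | spec :: cs'' =>
        (if spec = '%' then PEvt.lit ['%']
         else if ("diuxXofeEgGcs".toList).contains spec then PEvt.hole (spec ≠ 's')
         else PEvt.lit ['%', spec]) :: scanB cs''
    else if c = '\\' ∧ cs' ≠ [] then
      match cs' with
      | [] => []                                        -- unreachable: cs' ≠ []
      | e :: cs'' => PEvt.lit ((PySem.Dict.get? pvEsc e).getD [c, e]) :: scanB cs''
    else PEvt.lit [c] :: scanB cs'
  termination_by cs.length
  decreasing_by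
    all_goals first
      | (simp only [List.length_cons]; omega)
      | (have h1 := List.length_dropWhile_le (p := fun x => pvFlags.contains x) (l := cs')
         simp_all; omega)

-- Phase 2 body: one event, state (parts, buf (list of pieces, joined on flush), arg_idx)
def renderStepB (rest : List String) (st : List (List Char) × List (List Char) × Nat)
    (e : PEvt) : List (List Char) × List (List Char) × Nat :=
  match e with
  | .lit v => (st.1, st.2.1 ++ [v], st.2.2)             -- buf.append(val)
  | .hole isCast =>
    let text := st.2.1.flatten                          -- ''.join(buf)
    let fl := if text ≠ [] then (st.1 ++ [pvQuote text], ([] : List (List Char)))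
              else (st.1, st.2.1)
    if st.2.2 < rest.length then
      let a := rest.getD st.2.2 ""
      (fl.1 ++ [if isCast then ("cast(" ++ a ++ ", string)").toList else a.toList],
       fl.2, st.2.2 + 1)
    else (fl.1, fl.2, st.2.2)

def convert_printf_py_alt (args : List String) : String :=
  match args with
  | [] => "\"\""
  | fmt0 :: rest =>
    if PySem.Chars.startswith fmt0.toList ['"'] ∧ PySem.Chars.endswith fmt0.toList ['"'] then
      let body := PySem.List.slice fmt0.toList (some 1) (some (-1))   -- fmt[1:-1]
      let st := (scanB body).foldl (renderStepB rest) ([], [], 0)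
      let text := st.2.1.flatten
      let parts := if text ≠ [] then st.1 ++ [pvQuote text] else st.1
      if parts = [] then "\"\""
      else String.ofList (PySem.Chars.join (" + ".toList) parts)
    else "\"\" // printf with dynamic format - not converted"

-- ===== PRECONDITION & SPEC =====
def Spec_convert_printf_py (args : List String) (out : String) : Prop := out = convert_printf_py_alt args
instance (args : List String) (out : String) : Decidable (Spec_convert_printf_py args out) := by unfold Spec_convert_printf_py; infer_instance

-- ===== CLAIM (what is proved, stated in full; the proofs are below) =====
def Claim_equal_convert_printf_py : Prop := ∀ (args : List String), Dom_convert_printf_py args → Spec_convert_printf_py args (convert_printf_py args)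

-- ===== LEMMAS AND PROOFS =====

-- A's flush of `current` into `parts` (the pair A binds as `st`)
def pvFlushA (parts : List (List Char)) (current : List Char) : List (List Char) × List Char :=
  if current ≠ [] then (parts ++ [pvQuote current], []) else (parts, current)

-- B's buffer after a hole when it started as the single piece [current]
def pvFlushBuf (current : List Char) : List (List Char) :=
  if current ≠ [] then [] else [current]

theorem scan_conv (c : Char) (cs' cs'' : List Char) (spec : Char) (h1 : c = '%') (h2 : cs' ≠ [])
    (hd : cs'.dropWhile (fun x => pvFlags.contains x) = spec :: cs'') :
    scanB (c :: cs') =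
      (if spec = '%' then PEvt.lit ['%']
       else if ("diuxXofeEgGcs".toList).contains spec then PEvt.hole (spec ≠ 's')
       else PEvt.lit ['%', spec]) :: scanB cs'' := by
  rw [scanB.eq_def]
  simp only [if_pos (And.intro h1 h2)]
  split
  · rename_i heq; rw [hd] at heq; cases heq
  · rename_i s t heq; rw [hd] at heq; injection heq with e1 e2; subst e1; subst e2; rfl

theorem scan_conv_end (c : Char) (cs' : List Char) (h1 : c = '%') (h2 : cs' ≠ [])
    (hd : cs'.dropWhile (fun x => pvFlags.contains x) = []) :
    scanB (c :: cs') = [] := by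
  rw [scanB.eq_def]
  simp only [if_pos (And.intro h1 h2)]
  split
  · rfl
  · rename_i s t heq; rw [hd] at heq; cases heq

theorem scan_esc (c e : Char) (cs'' : List Char) (h1 : ¬ (c = '%' ∧ (e :: cs'') ≠ [])) (h2 : c = '\\') :
    scanB (c :: e :: cs'') = PEvt.lit ((PySem.Dict.get? pvEsc e).getD [c, e]) :: scanB cs'' := by
  rw [scanB.eq_def]
  simp only [if_neg h1, if_pos (And.intro h2 (by simp : (e :: cs'') ≠ []))]

theorem scan_lit (c : Char) (cs' : List Char) (h1 : ¬ (c = '%' ∧ cs' ≠ []))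
    (h2 : ¬ (c = '\\' ∧ cs' ≠ [])) :
    scanB (c :: cs') = PEvt.lit [c] :: scanB cs' := by
  rw [scanB.eq_def]
  simp only [if_neg h1, if_neg h2]

theorem pvEsc_getD (e : Char) :
    (PySem.Dict.get? pvEsc e).getD ['\\', e] =
      (if e = 'n' then ['\\','n'] else if e = 't' then ['\\','t']
       else if e = '\\' then ['\\','\\'] else if e = '"' then ['\\','"'] else ['\\', e]) := by
  by_cases e1 : e = 'n'
  · subst e1; decide
  · by_cases e2 : e = 't'
    · subst e2; decide
    · by_cases e3 : e = '\\'
      · subst e3; decide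
      · by_cases e4 : e = '"'
        · subst e4; decide
        · simp [pvEsc, PySem.Dict.get?_mk_cons, PySem.Dict.get?, e1, e2, e3, e4,
            (show ¬ ('n' : Char) = e from fun h => e1 h.symm),
            (show ¬ ('t' : Char) = e from fun h => e2 h.symm),
            (show ¬ ('\\' : Char) = e from fun h => e3 h.symm),
            (show ¬ ('"' : Char) = e from fun h => e4 h.symm)]

theorem rstep_lit (rest : List String) (parts buf : List (List Char)) (argIdx : Nat) (v : List Char) :
    renderStepB rest (parts, buf, argIdx) (PEvt.lit v) = (parts, buf ++ [v], argIdx) := rfl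

theorem rstep_hole_single (rest : List String) (parts : List (List Char)) (current : List Char)
    (argIdx : Nat) (b : Bool) :
    renderStepB rest (parts, [current], argIdx) (PEvt.hole b) =
      (if argIdx < rest.length then
        ((pvFlushA parts current).1 ++
           [if b then ("cast(" ++ rest.getD argIdx "" ++ ", string)").toList
            else (rest.getD argIdx "").toList],
         pvFlushBuf current, argIdx + 1)
       else ((pvFlushA parts current).1, pvFlushBuf current, argIdx)) := by
  by_cases hc : current = [] <;> by_cases ha : argIdx < rest.length <;>
    simp [renderStepB, pvFlushA, pvFlushBuf, hc, ha]

theorem foldl_render_congr (rest : List String) (evs : List PEvt) (parts : List (List Char))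
    (buf buf' : List (List Char)) (argIdx : Nat) (h : buf.flatten = buf'.flatten) :
    (fun st => (st.1, st.2.1.flatten)) (evs.foldl (renderStepB rest) (parts, buf, argIdx)) =
    (fun st => (st.1, st.2.1.flatten)) (evs.foldl (renderStepB rest) (parts, buf', argIdx)) := by
  induction evs generalizing parts buf buf' argIdx with
  | nil => simpa using h
  | cons e evs ih =>
    cases e with
    | lit v =>
      simp only [List.foldl_cons, renderStepB]
      exact ih _ _ _ _ (by simp [h])
    | hole b =>
      simp only [List.foldl_cons, renderStepB, h]
      by_cases hb : buf'.flatten ≠ []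
      · simp only [if_pos hb]
      · simp only [if_neg hb]
        by_cases ha : argIdx < rest.length
        · simp only [if_pos ha]; exact ih _ _ _ _ h
        · simp only [if_neg ha]; exact ih _ _ _ _ h

set_option maxHeartbeats 1000000 in
theorem loopA_eq_render (rest : List String) (cs : List Char) (argIdx : Nat)
    (parts : List (List Char)) (current : List Char) :
    convertLoopA rest cs argIdx parts current =
      (fun st => (st.1, st.2.1.flatten))
        ((scanB cs).foldl (renderStepB rest) (parts, [current], argIdx)) := by
  fun_induction convertLoopA rest cs argIdx parts current
  case case1 => simp [scanB]
  case case2 =>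
    rename_i argIdx parts current c cs' hpc hdrop
    obtain ⟨h1, h2⟩ := hpc
    rw [scan_conv_end c cs' h1 h2 hdrop]
    simp
  case case3 =>
    rename_i argIdx parts current c cs' hpc cs'' hdrop ih
    obtain ⟨h1, h2⟩ := hpc
    rw [scan_conv c cs' cs'' '%' h1 h2 hdrop, List.foldl_cons, if_pos rfl, rstep_lit]
    exact ih.trans (foldl_render_congr rest (scanB cs'') parts
      [current ++ ['%']] ([current] ++ [['%']]) argIdx (by simp))
  case case4 =>
    rename_i argIdx parts current c cs' hpc spec cs'' hdrop hnp hclass st harg ih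
    obtain ⟨h1, h2⟩ := hpc
    have hco : (("diuxXofeEgGcs".toList).contains spec) = true := by
      rcases hclass with h|h|h|h|h|h <;> subst h <;> decide
    have hho : spec ≠ 's' := by
      rcases hclass with h|h|h|h|h|h <;> subst h <;> decide
    rw [scan_conv c cs' cs'' spec h1 h2 hdrop, List.foldl_cons, if_neg hnp,
      if_pos (by exact_mod_cast hco), rstep_hole_single, if_pos harg,
      if_pos (by simpa using hho)]
    exact ih.trans (foldl_render_congr rest (scanB cs'') _
      [(pvFlushA parts current).2] (pvFlushBuf current) (argIdx + 1)
      (by by_cases hc : current = [] <;> simp [pvFlushA, pvFlushBuf, hc]))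
  case case5 =>
    rename_i argIdx parts current c cs' hpc spec cs'' hdrop hnp hclass st harg ih
    obtain ⟨h1, h2⟩ := hpc
    have hco : (("diuxXofeEgGcs".toList).contains spec) = true := by
      rcases hclass with h|h|h|h|h|h <;> subst h <;> decide
    rw [scan_conv c cs' cs'' spec h1 h2 hdrop, List.foldl_cons, if_neg hnp,
      if_pos (by exact_mod_cast hco), rstep_hole_single, if_neg harg]
    exact ih.trans (foldl_render_congr rest (scanB cs'') _
      [(pvFlushA parts current).2] (pvFlushBuf current) argIdx
      (by by_cases hc : current = [] <;> simp [pvFlushA, pvFlushBuf, hc]))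
  case case6 =>
    rename_i argIdx parts current c cs' hpc spec cs'' hdrop hnp hnd hclass st harg ih
    obtain ⟨h1, h2⟩ := hpc
    have hco : (("diuxXofeEgGcs".toList).contains spec) = true := by
      rcases hclass with h|h|h|h|h <;> subst h <;> decide
    have hho : spec ≠ 's' := by
      rcases hclass with h|h|h|h|h <;> subst h <;> decide
    rw [scan_conv c cs' cs'' spec h1 h2 hdrop, List.foldl_cons, if_neg hnp,
      if_pos (by exact_mod_cast hco), rstep_hole_single, if_pos harg,
      if_pos (by simpa using hho)]
    exact ih.trans (foldl_render_congr rest (scanB cs'') _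
      [(pvFlushA parts current).2] (pvFlushBuf current) (argIdx + 1)
      (by by_cases hc : current = [] <;> simp [pvFlushA, pvFlushBuf, hc]))
  case case7 =>
    rename_i argIdx parts current c cs' hpc spec cs'' hdrop hnp hnd hclass st harg ih
    obtain ⟨h1, h2⟩ := hpc
    have hco : (("diuxXofeEgGcs".toList).contains spec) = true := by
      rcases hclass with h|h|h|h|h <;> subst h <;> decide
    rw [scan_conv c cs' cs'' spec h1 h2 hdrop, List.foldl_cons, if_neg hnp,
      if_pos (by exact_mod_cast hco), rstep_hole_single, if_neg harg]
    exact ih.trans (foldl_render_congr rest (scanB cs'') _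
      [(pvFlushA parts current).2] (pvFlushBuf current) argIdx
      (by by_cases hc : current = [] <;> simp [pvFlushA, pvFlushBuf, hc]))
  case case8 =>
    rename_i argIdx parts current c cs' hpc cs'' st harg hdrop hnp hnd hnf ih
    obtain ⟨h1, h2⟩ := hpc
    rw [scan_conv c cs' cs'' 's' h1 h2 hdrop, List.foldl_cons, if_neg hnp,
      if_pos (by decide), rstep_hole_single, if_pos harg, if_neg (by decide)]
    exact ih.trans (foldl_render_congr rest (scanB cs'') _
      [(pvFlushA parts current).2] (pvFlushBuf current) (argIdx + 1)
      (by by_cases hc : current = [] <;> simp [pvFlushA, pvFlushBuf, hc]))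
  case case9 =>
    rename_i argIdx parts current c cs' hpc cs'' st harg hdrop hnp hnd hnf ih
    obtain ⟨h1, h2⟩ := hpc
    rw [scan_conv c cs' cs'' 's' h1 h2 hdrop, List.foldl_cons, if_neg hnp,
      if_pos (by decide), rstep_hole_single, if_neg harg]
    exact ih.trans (foldl_render_congr rest (scanB cs'') _
      [(pvFlushA parts current).2] (pvFlushBuf current) argIdx
      (by by_cases hc : current = [] <;> simp [pvFlushA, pvFlushBuf, hc]))
  case case10 =>
    rename_i argIdx parts current c cs' hpc cs'' st harg hdrop hnp hnd hnf hns ih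
    obtain ⟨h1, h2⟩ := hpc
    rw [scan_conv c cs' cs'' 'c' h1 h2 hdrop, List.foldl_cons, if_neg hnp,
      if_pos (by decide), rstep_hole_single, if_pos harg, if_pos (by decide)]
    exact ih.trans (foldl_render_congr rest (scanB cs'') _
      [(pvFlushA parts current).2] (pvFlushBuf current) (argIdx + 1)
      (by by_cases hc : current = [] <;> simp [pvFlushA, pvFlushBuf, hc]))
  case case11 =>
    rename_i argIdx parts current c cs' hpc cs'' st harg hdrop hnp hnd hnf hns ih
    obtain ⟨h1, h2⟩ := hpc
    rw [scan_conv c cs' cs'' 'c' h1 h2 hdrop, List.foldl_cons, if_neg hnp,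
      if_pos (by decide), rstep_hole_single, if_neg harg]
    exact ih.trans (foldl_render_congr rest (scanB cs'') _
      [(pvFlushA parts current).2] (pvFlushBuf current) argIdx
      (by by_cases hc : current = [] <;> simp [pvFlushA, pvFlushBuf, hc]))
  case case12 =>
    rename_i argIdx parts current c cs' hpc spec cs'' hdrop hnp hnd hnf hns hnc ih
    obtain ⟨h1, h2⟩ := hpc
    have hco : ¬ ((("diuxXofeEgGcs".toList).contains spec) = true) := by
      intro hmem
      have hm : spec ∈ ['d','i','u','x','X','o','f','e','E','g','G','c','s'] := by
        simpa using hmem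
      simp only [List.mem_cons, List.not_mem_nil, or_false] at hm
      tauto
    rw [scan_conv c cs' cs'' spec h1 h2 hdrop, List.foldl_cons, if_neg hnp,
      if_neg hco, rstep_lit]
    exact ih.trans (foldl_render_congr rest (scanB cs'') parts
      [current ++ ['%', spec]] ([current] ++ [['%', spec]]) argIdx (by simp))
  case case13 =>
    rename_i argIdx parts current c hnp hbs
    exact absurd hbs.2 (by simp)
  case case14 =>
    rename_i argIdx parts current c e cs'' add hnp hbs ih
    obtain ⟨h1, _⟩ := hbs
    rw [scan_esc c e cs'' hnp h1, List.foldl_cons, rstep_lit]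
    refine ih.trans (foldl_render_congr rest (scanB cs'') parts
      [current ++ add] ([current] ++ [(PySem.Dict.get? pvEsc e).getD [c, e]]) argIdx ?_)
    have hadd : (PySem.Dict.get? pvEsc e).getD [c, e] = add := by
      subst h1
      rw [pvEsc_getD]
      simp only [add]
      split_ifs <;> rfl
    simp [hadd]
  case case15 =>
    rename_i argIdx parts current c cs' hnp hnb ih
    rw [scan_lit c cs' hnp hnb, List.foldl_cons, rstep_lit]
    exact ih.trans (foldl_render_congr rest (scanB cs') parts
      [current ++ [c]] ([current] ++ [[c]]) argIdx (by simp))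

-- ===== VERDICT (by name: the statement is the Claim_ definition above) =====
theorem convert_printf_py_spec : Claim_equal_convert_printf_py := by
  intro args _
  unfold Spec_convert_printf_py convert_printf_py convert_printf_py_alt
  match args with
  | [] => rfl
  | fmt0 :: rest =>
    simp only
    split
    · have h1 := loopA_eq_render rest (PySem.List.slice fmt0.toList (some 1) (some (-1))) 0 [] []
      have h2 := foldl_render_congr rest (scanB (PySem.List.slice fmt0.toList (some 1) (some (-1))))
        [] [[]] [] 0 (by simp)
      rw [h1, h2]
    · rfl
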